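-- pv_equiv track=rewrite | github.com/ArminKleinert/oop_tasks | task_0_to_5/task4/task.py | jump_insert_sort_ops
-- ===== SOURCE A (Python) =====
-- def jump_insert_sort_ops(A, start, step):
--     cmp_ops = 0
--     for i in range(start+step, len(A), step):
--         value = A[i]
--         j = i
--         while  j >= step  and  A[j-step] > value:
--             cmp_ops += 2
--             A[j] = A[j-step]
--             j = j - step
--         A[j] = value
--     return cmp_ops
-- ===== SOURCE B (Python) =====
-- # Counts operations by insertion-sorting the extracted strided chain: each element's
-- # run of greater predecessors is measured with takewhile over the reversed prefix and
-- # the element placed with list.insert; the sorted chain is written back in one slice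
-- # assignment (same in-place effect on A).
-- from itertools import takewhile
--
-- def jump_insert_sort_ops(A, start, step):
--     done = []
--     cmp_ops = 0
--     for v in A[start::step]:
--         cnt = sum(1 for x in takewhile(lambda x: x > v, reversed(done)))
--         cmp_ops += 2 * cnt
--         done.insert(len(done) - cnt, v)
--     A[start::step] = done
--     return cmp_ops
-- ===== Notes on version B (the rewrite author's own statement) =====
-- stated objective: alternative
-- what changed: Replaces in-place index-arithmetic shifting inside A by insertion-sorting the extracted chain A[start::step] (takewhile counts each element's greater-run, list.insert places it, one slice write-back); Pre_ excludes step <= 0 (A raises ValueError/IndexError whenever its loop runs) and start outside [0, step) with a nonempty scan, where A's negative-index wraparound and never-sorted prefix below start are accidents of its index arithmetic.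
-- outside the precondition, e.g. on jump_insert_sort_ops([0, 9, 0, 1], -5, 2): A returns 2, B returns 0; on jump_insert_sort_ops([5, 4, 3, 2, 1], 1, 1): A returns 18, B returns 12; on jump_insert_sort_ops([3, 1, 2], 0, -2): A returns 0, B returns 0
import Mathlib
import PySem

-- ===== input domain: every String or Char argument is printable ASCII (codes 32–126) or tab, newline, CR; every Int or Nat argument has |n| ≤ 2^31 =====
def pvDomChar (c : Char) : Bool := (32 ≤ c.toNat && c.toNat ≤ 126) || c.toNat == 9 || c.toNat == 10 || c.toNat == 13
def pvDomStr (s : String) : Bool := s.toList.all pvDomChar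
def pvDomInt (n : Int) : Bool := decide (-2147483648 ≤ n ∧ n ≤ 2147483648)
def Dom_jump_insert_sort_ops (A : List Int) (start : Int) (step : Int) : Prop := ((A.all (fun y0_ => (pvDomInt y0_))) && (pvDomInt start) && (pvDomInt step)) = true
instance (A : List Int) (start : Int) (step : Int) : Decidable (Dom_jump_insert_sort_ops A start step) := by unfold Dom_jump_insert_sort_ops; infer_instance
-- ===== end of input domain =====

-- B insertion-sorts the extracted chain A[start::step] (takewhile + list.insert) instead of
-- shifting inside A with index arithmetic; equivalence is about the return value (both Pythons
-- also sort the stride of A in place identically inside Pre_).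

-- ===== PORT A =====
-- inner while loop of A: while j >= step and A[j-step] > value: shift.  The '1 ≤ step' conjunct is
-- only a totality guard (Python raises before the loop when step = 0; inside Pre_ step is positive).
def jisInner (arr : List Int) (value : Int) (j : Int) (step : Int) (cmp : Int) :
    List Int × Int × Int :=
  if h : 1 ≤ step ∧ step ≤ j ∧ value < PySem.List.pyGetD arr (j - step) 0 then
    jisInner (PySem.List.pySetD arr j (PySem.List.pyGetD arr (j - step) 0)) value (j - step) step
      (cmp + 2)
  else (arr, j, cmp)
termination_by j.toNat
decreasing_by omega

def jump_insert_sort_ops (A : List Int) (start : Int) (step : Int) : Int :=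
  ((PySem.List.pyRange (start + step) (A.length : Int) step).foldl
    (fun acc i =>
      let value := PySem.List.pyGetD acc.1 i 0
      let r := jisInner acc.1 value i step acc.2
      (PySem.List.pySetD r.1 r.2.1 value, r.2.2))
    (A, (0 : Int))).2

-- ===== PORT B =====
-- Source B: for each v of the chain A[start::step], count its run of greater predecessors with
-- takewhile over the reversed prefix and place it with list.insert; the slice write-back
-- mutates A only — the return value ported here does not use it
def jump_insert_sort_ops_alt (A : List Int) (start : Int) (step : Int) : Int :=
  (((PySem.List.slice? A (some start) none step).getD []).foldl
    (fun (acc : List Int × Int) v =>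
      (PySem.List.insert acc.1 ((acc.1.length : Int)
          - ((acc.1.reverse.takeWhile (fun x => decide (v < x))).length : Int)) v,
       acc.2 + 2 * ((acc.1.reverse.takeWhile (fun x => decide (v < x))).length : Int)))
    ([], (0 : Int))).2

-- ===== PRECONDITION & SPEC =====
-- Pre_ is the natural domain of a strided pass: a positive step and either 0 ≤ start < step, or a
-- start past the point where the loop body could run (the scan is empty and both programs return 0).
-- Excluded although A returns on some of them (accidents of A's index arithmetic, not claimed):
-- step = 0 (both raise ValueError), step < 0 (A raises IndexError whenever its loop runs, else
-- returns 0), and start < 0 or start ≥ step with a nonempty scan, where A walks wrapped-around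
-- negative positions or compares across a never-sorted prefix below start.
def Pre_jump_insert_sort_ops (A : List Int) (start : Int) (step : Int) : Prop :=
  1 ≤ step ∧ ((0 ≤ start ∧ start < step) ∨ (A.length : Int) ≤ start + step)

instance (A : List Int) (start : Int) (step : Int) :
    Decidable (Pre_jump_insert_sort_ops A start step) := by
  unfold Pre_jump_insert_sort_ops; infer_instance

def pvWitness_jump_insert_sort_ops : List Int × Int × Int := ([3, 1, 2, 0, 5], 0, 2)

def Spec_jump_insert_sort_ops (A : List Int) (start : Int) (step : Int) (out : Int) : Prop :=
  out = jump_insert_sort_ops_alt A start step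
instance (A : List Int) (start : Int) (step : Int) (out : Int) :
    Decidable (Spec_jump_insert_sort_ops A start step out) := by
  unfold Spec_jump_insert_sort_ops; infer_instance

-- ===== CLAIM (what is proved, stated in full; the proofs are below) =====
def Claim_equal_jump_insert_sort_ops : Prop :=
  ∀ (A : List Int) (start : Int) (step : Int), Dom_jump_insert_sort_ops A start step →
    Pre_jump_insert_sort_ops A start step →
    Spec_jump_insert_sort_ops A start step (jump_insert_sort_ops A start step)

-- ===== LEMMAS AND PROOFS =====

-- inversion count of a list (pairs earlier > later), and the bipartite cross count
def invA : List Int → Int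
  | [] => 0
  | x :: t => (t.countP (fun b => b < x) : Int) + invA t

def cross (l r : List Int) : Int := (r.map (fun b => (l.countP (fun a => b < a) : Int))).sum

-- insertion position / one sorted-insert step / insertion-sort of a list
def sinsPos (c : List Int) (v : Int) : Nat := c.countP (fun a => a ≤ v)

def chainIns (c : List Int) (v : Int) : List Int :=
  c.take (sinsPos c v) ++ v :: c.drop (sinsPos c v)

def chainOf (xs : List Int) : List Int := xs.foldl chainIns []

-- A's inner while loop expressed on the stride content alone
def insLoop (c : List Int) (k : Nat) (v : Int) (cmp : Int) : List Int × Nat × Int :=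
  if h : 1 ≤ k ∧ v < c.getD (k - 1) 0 then
    insLoop (c.set k (c.getD (k - 1) 0)) (k - 1) v (cmp + 2)
  else (c, k, cmp)
termination_by k

-- the full array viewed as original A with the first c.length stride slots overwritten by c
def embed (A : List Int) (s st : Nat) (c : List Int) : List Int :=
  A.mapIdx fun p a =>
    if s ≤ p ∧ (p - s) % st = 0 ∧ (p - s) / st < c.length then c.getD ((p - s) / st) 0 else a

-- the first t elements of the stride A[s::st]
def subPre (A : List Int) (s st t : Nat) : List Int :=
  (List.range t).map fun k => A.getD (s + k * st) 0

theorem cross_nil_left (r : List Int) : cross [] r = 0 := by simp [cross]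

theorem cross_cons_right (l : List Int) (b : Int) (r : List Int) :
    cross l (b :: r) = (l.countP (fun a => b < a) : Int) + cross l r := by simp [cross]

theorem cross_cons_left (x : Int) (l r : List Int) :
    cross (x :: l) r = (r.countP (fun b => b < x) : Int) + cross l r := by
  induction r with
  | nil => simp [cross]
  | cons b r ih =>
    rw [cross_cons_right, cross_cons_right, ih, List.countP_cons]
    by_cases h : b < x <;> simp [h] <;> push_cast <;> ring

theorem invA_append (l r : List Int) : invA (l ++ r) = invA l + invA r + cross l r := by
  induction l with
  | nil => simp [invA, cross_nil_left]
  | cons x l ih =>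
    simp only [List.cons_append, invA, ih, List.countP_append, cross_cons_left]
    push_cast; ring

theorem invA_snoc (l : List Int) (v : Int) :
    invA (l ++ [v]) = invA l + (l.countP (fun a => v < a) : Int) := by
  rw [invA_append]; simp [invA, cross]

theorem sinsPos_le_length (c : List Int) (v : Int) : sinsPos c v ≤ c.length :=
  List.countP_le_length

theorem getD_take_lt {c : List Int} {n i : Nat} (h : i < n) :
    (c.take n).getD i 0 = c.getD i 0 := by
  rw [List.getD_eq_getElem?_getD, List.getD_eq_getElem?_getD, List.getElem?_take_of_lt h]

theorem sorted_le_of_lt_pos : ∀ {c : List Int}, c.Pairwise (· ≤ ·) → ∀ (v : Int) {j : Nat},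
    j < sinsPos c v → c.getD j 0 ≤ v := by
  intro c
  induction c with
  | nil => intro _ v j hlt; simp [sinsPos] at hlt
  | cons x t ih =>
    intro hc v j hlt
    rw [List.pairwise_cons] at hc
    by_cases hx : x ≤ v
    · cases j with
      | zero => simpa using hx
      | succ j =>
        have hK : sinsPos (x :: t) v = sinsPos t v + 1 := by
          simp [sinsPos, List.countP_cons, hx]
        rw [List.getD_cons_succ]
        exact ih hc.2 v (by omega)
    · exfalso
      have hK : sinsPos (x :: t) v = 0 := by
        simp only [sinsPos, List.countP_cons]
        rw [List.countP_eq_zero.mpr]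
        · simp [hx]
        · intro b hb
          simp only [decide_eq_true_eq]
          intro hbv
          exact hx (le_trans (hc.1 b hb) hbv)
      omega

theorem sorted_lt_of_pos_le : ∀ {c : List Int}, c.Pairwise (· ≤ ·) → ∀ (v : Int) {j : Nat},
    j < c.length → sinsPos c v ≤ j → v < c.getD j 0 := by
  intro c
  induction c with
  | nil => intro _ v j hj _; simp at hj
  | cons x t ih =>
    intro hc v j hj hle
    rw [List.pairwise_cons] at hc
    by_cases hx : x ≤ v
    · have hK : sinsPos (x :: t) v = sinsPos t v + 1 := by
        simp [sinsPos, List.countP_cons, hx]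
      cases j with
      | zero => omega
      | succ j =>
        rw [List.getD_cons_succ]
        exact ih hc.2 v (by simpa using hj) (by omega)
    · push_neg at hx
      cases j with
      | zero => simpa using hx
      | succ j =>
        have hjt : j < t.length := by simpa using hj
        rw [List.getD_cons_succ]
        have hmem : t.getD j 0 ∈ t := by
          rw [List.getD_eq_getElem?_getD, List.getElem?_eq_getElem hjt]
          exact List.getElem_mem hjt
        exact lt_of_lt_of_le hx (hc.1 _ hmem)

theorem mem_take_le {c : List Int} (hc : c.Pairwise (· ≤ ·)) {v a : Int}
    (ha : a ∈ c.take (sinsPos c v)) : a ≤ v := by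
  obtain ⟨i, hi, rfl⟩ := List.mem_iff_getElem.mp ha
  have hi1 : i < sinsPos c v := by
    have h := hi
    simp only [List.length_take] at h
    omega
  have heq : (c.take (sinsPos c v))[i]'hi = c.getD i 0 := by
    rw [List.getElem_take]
    have hi2 : i < c.length := lt_of_lt_of_le hi1 (sinsPos_le_length c v)
    rw [List.getD_eq_getElem?_getD, List.getElem?_eq_getElem hi2]
    rfl
  rw [heq]
  exact sorted_le_of_lt_pos hc v hi1

theorem mem_drop_gt {c : List Int} (hc : c.Pairwise (· ≤ ·)) {v b : Int}
    (hb : b ∈ c.drop (sinsPos c v)) : v < b := by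
  obtain ⟨i, hi, rfl⟩ := List.mem_iff_getElem.mp hb
  have hi1 : sinsPos c v + i < c.length := by
    have h := hi
    simp only [List.length_drop] at h
    omega
  have heq : (c.drop (sinsPos c v))[i]'hi = c.getD (sinsPos c v + i) 0 := by
    rw [List.getElem_drop]
    rw [List.getD_eq_getElem?_getD, List.getElem?_eq_getElem hi1]
    rfl
  rw [heq]
  exact sorted_lt_of_pos_le hc v hi1 (by omega)

theorem chainIns_perm (c : List Int) (v : Int) : (chainIns c v).Perm (v :: c) := by
  unfold chainIns
  refine List.perm_middle.trans ?_
  rw [List.take_append_drop]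

theorem chainIns_sorted {c : List Int} (hc : c.Pairwise (· ≤ ·)) (v : Int) :
    (chainIns c v).Pairwise (· ≤ ·) := by
  unfold chainIns
  rw [List.pairwise_append]
  refine ⟨hc.sublist (List.take_sublist _ _), ?_, ?_⟩
  · rw [List.pairwise_cons]
    exact ⟨fun b hb => le_of_lt (mem_drop_gt hc hb), hc.sublist (List.drop_sublist _ _)⟩
  · intro a ha b hb
    have h1 : a ≤ v := mem_take_le hc ha
    rcases List.mem_cons.mp hb with rfl | hb
    · exact h1
    · exact le_trans h1 (le_of_lt (mem_drop_gt hc hb))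

theorem chainOf_aux (xs : List Int) : ∀ c, c.Pairwise (· ≤ ·) →
    (xs.foldl chainIns c).Pairwise (· ≤ ·) ∧ (xs.foldl chainIns c).Perm (c ++ xs) := by
  induction xs with
  | nil => intro c hc; simpa using hc
  | cons x xs ih =>
    intro c hc
    obtain ⟨h1, h2⟩ := ih (chainIns c x) (chainIns_sorted hc x)
    refine ⟨h1, ?_⟩
    refine h2.trans ?_
    refine (((chainIns_perm c x).append_right xs).trans ?_)
    exact List.perm_middle.symm

theorem chainOf_sorted (xs : List Int) : (chainOf xs).Pairwise (· ≤ ·) :=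
  (chainOf_aux xs [] List.Pairwise.nil).1

theorem chainOf_perm (xs : List Int) : (chainOf xs).Perm xs := by
  simpa using (chainOf_aux xs [] List.Pairwise.nil).2

theorem chainOf_length (xs : List Int) : (chainOf xs).length = xs.length :=
  (chainOf_perm xs).length_eq

-- one shifted step of the stride content
theorem content_set_step {c : List Int} {k : Nat} (hk : k < c.length) (v : Int) :
    (c.take (k + 1) ++ c.getD (k + 1) v :: c.drop (k + 1)).set (k + 1) (c.getD k 0) =
      c.take k ++ c.getD k v :: c.drop k := by
  have hg : c.getD k v = c.getD k 0 := by
    rw [List.getD_eq_getElem?_getD, List.getD_eq_getElem?_getD,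
      List.getElem?_eq_getElem hk]
    rfl
  have h1 : c.take (k + 1) = c.take k ++ [c.getD k 0] := by
    rw [List.take_succ, List.getElem?_eq_getElem hk]
    simp [List.getD_eq_getElem?_getD, List.getElem?_eq_getElem hk]
  have h2 : c.drop k = c.getD k 0 :: c.drop (k + 1) := by
    rw [List.drop_eq_getElem_cons hk]
    simp [List.getD_eq_getElem?_getD, List.getElem?_eq_getElem hk]
  have hlen : (c.take (k + 1)).length = k + 1 := by
    simp only [List.length_take]
    omega
  rw [List.set_append, if_neg (by omega), hlen, Nat.sub_self, List.set_cons_zero, h1, hg, h2,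
    List.append_assoc, List.cons_append, List.nil_append]

theorem insLoop_run {c : List Int} (hc : c.Pairwise (· ≤ ·)) (v : Int) :
    ∀ (k : Nat), sinsPos c v ≤ k → k ≤ c.length → ∀ cmp : Int,
    insLoop (c.take k ++ c.getD k v :: c.drop k) k v cmp =
      (c.take (sinsPos c v) ++ c.getD (sinsPos c v) v :: c.drop (sinsPos c v),
       sinsPos c v, cmp + 2 * ((k : Int) - (sinsPos c v : Int))) := by
  intro k
  induction k with
  | zero =>
    intro h0 _ cmp
    have hK : sinsPos c v = 0 := by omega
    rw [insLoop, dif_neg (by omega), hK]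
    norm_num
  | succ k ih =>
    intro hK hlen cmp
    have hkc : k < c.length := by omega
    have hcont : (c.take (k + 1) ++ c.getD (k + 1) v :: c.drop (k + 1)).getD k 0
        = c.getD k 0 := by
      rw [List.getD_append _ _ _ _ (by simp only [List.length_take]; omega)]
      exact getD_take_lt (by omega)
    by_cases hstop : sinsPos c v = k + 1
    · have hle : c.getD k 0 ≤ v := sorted_le_of_lt_pos hc v (by omega)
      rw [insLoop, dif_neg (by
        simp only [Nat.add_sub_cancel, hcont]
        intro hcon
        exact absurd hcon.2 (not_lt.mpr hle)), hstop]
      norm_num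
    · have hK' : sinsPos c v ≤ k := by omega
      have hgt : v < c.getD k 0 := sorted_lt_of_pos_le hc v hkc hK'
      rw [insLoop, dif_pos (by
        refine ⟨by omega, ?_⟩
        simp only [Nat.add_sub_cancel, hcont]
        exact hgt)]
      simp only [Nat.add_sub_cancel, hcont]
      rw [content_set_step hkc v, ih hK' (by omega) (cmp + 2)]
      have : cmp + 2 + 2 * ((k : Int) - (sinsPos c v : Int))
          = cmp + 2 * (((k + 1 : Nat) : Int) - (sinsPos c v : Int)) := by
        push_cast
        ring
      rw [this]

theorem stride_uniq {s st p : Nat} (h1 : s ≤ p) (h2 : (p - s) % st = 0) :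
    p = s + ((p - s) / st) * st := by
  have := Nat.div_mul_cancel (Nat.dvd_of_mod_eq_zero h2)
  omega

theorem embed_length (A : List Int) (s st : Nat) (c : List Int) :
    (embed A s st c).length = A.length := by simp [embed]

theorem embed_getElem {A : List Int} {s st : Nat} {c : List Int} {p : Nat} (hp : p < A.length) :
    (embed A s st c)[p]'(by rw [embed_length]; exact hp) =
      if s ≤ p ∧ (p - s) % st = 0 ∧ (p - s) / st < c.length
      then c.getD ((p - s) / st) 0 else A[p] := by
  simp [embed]

theorem embed_getD {A : List Int} {s st : Nat} {c : List Int} {p : Nat} (hp : p < A.length) :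
    (embed A s st c).getD p 0 =
      if s ≤ p ∧ (p - s) % st = 0 ∧ (p - s) / st < c.length
      then c.getD ((p - s) / st) 0 else A[p] := by
  rw [List.getD_eq_getElem?_getD,
    List.getElem?_eq_getElem (by rw [embed_length]; exact hp), Option.getD_some,
    embed_getElem hp]

theorem stride_cond {s st k : Nat} (hst : 1 ≤ st) :
    (s + k * st - s) % st = 0 ∧ (s + k * st - s) / st = k := by
  have h1 : s + k * st - s = k * st := by omega
  rw [h1, Nat.mul_mod_left, Nat.mul_div_cancel _ (by omega)]
  exact ⟨rfl, rfl⟩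

theorem embed_getD_stride {A : List Int} {s st : Nat} (hst : 1 ≤ st) {c : List Int} {k : Nat}
    (hk : k < c.length) (hp : s + k * st < A.length) :
    (embed A s st c).getD (s + k * st) 0 = c.getD k 0 := by
  obtain ⟨h1, h2⟩ := stride_cond (s := s) (k := k) hst
  rw [embed_getD hp, if_pos ⟨by omega, h1, by rw [h2]; exact hk⟩, h2]

theorem embed_getD_stride_out {A : List Int} {s st : Nat} (hst : 1 ≤ st) {c : List Int} {k : Nat}
    (hk : c.length ≤ k) (hp : s + k * st < A.length) :
    (embed A s st c).getD (s + k * st) 0 = A.getD (s + k * st) 0 := by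
  obtain ⟨h1, h2⟩ := stride_cond (s := s) (k := k) hst
  rw [embed_getD hp, if_neg (by rw [h2]; omega),
    List.getD_eq_getElem?_getD, List.getElem?_eq_getElem hp]
  rfl

theorem embed_set_stride {A : List Int} {s st : Nat} (hst : 1 ≤ st) {c : List Int} {k : Nat}
    (hk : k < c.length) (hp : s + k * st < A.length) (x : Int) :
    (embed A s st c).set (s + k * st) x = embed A s st (c.set k x) := by
  apply List.ext_getElem
  · simp [embed_length]
  intro p h1 h2
  have hpA : p < A.length := by
    rw [embed_length] at h2; exact h2
  rw [List.getElem_set, embed_getElem hpA, embed_getElem hpA]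
  by_cases he : s + k * st = p
  · subst he
    obtain ⟨hm, hd⟩ := stride_cond (s := s) (k := k) hst
    rw [if_pos rfl, if_pos ⟨by omega, hm, by rw [hd]; simpa using hk⟩, hd,
      List.getD_eq_getElem?_getD, List.getElem?_set_self hk]
    rfl
  · rw [if_neg he]
    by_cases hcond : s ≤ p ∧ (p - s) % st = 0 ∧ (p - s) / st < c.length
    · obtain ⟨ha, hb, hd⟩ := hcond
      have hkk : (p - s) / st ≠ k := by
        intro hkk
        exact he (by rw [stride_uniq ha hb, hkk])
      rw [if_pos ⟨ha, hb, hd⟩, if_pos ⟨ha, hb, by simpa using hd⟩,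
        List.getD_eq_getElem?_getD, List.getD_eq_getElem?_getD,
        List.getElem?_set_ne (by omega)]
    · rw [if_neg hcond, if_neg (fun hcon => hcond ⟨hcon.1, hcon.2.1, by
        have := hcon.2.2
        simpa using this⟩)]

theorem embed_self {A : List Int} {s st : Nat} (hst : 1 ≤ st) {c : List Int}
    (h : ∀ k, k < c.length → c.getD k 0 = A.getD (s + k * st) 0) :
    embed A s st c = A := by
  apply List.ext_getElem
  · simp [embed_length]
  intro p h1 h2
  rw [embed_getElem h2]
  split_ifs with hcond
  · obtain ⟨hsp, hmod, hdiv⟩ := hcond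
    rw [h _ hdiv, ← stride_uniq hsp hmod,
      List.getD_eq_getElem?_getD, List.getElem?_eq_getElem h2]
    rfl
  · rfl

theorem embed_snoc_self {A : List Int} {s st : Nat} (hst : 1 ≤ st) {c : List Int}
    (hp : s + c.length * st < A.length) :
    embed A s st (c ++ [A.getD (s + c.length * st) 0]) = embed A s st c := by
  apply List.ext_getElem
  · simp [embed_length]
  intro p h1 h2
  have hpA : p < A.length := by rw [embed_length] at h1; exact h1
  rw [embed_getElem hpA, embed_getElem hpA]
  by_cases hcond : s ≤ p ∧ (p - s) % st = 0
  · obtain ⟨ha, hb⟩ := hcond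
    by_cases hlt : (p - s) / st < c.length
    · have hlen1 : (p - s) / st < (c ++ [A.getD (s + c.length * st) 0]).length := by
        simp only [List.length_append, List.length_cons, List.length_nil]
        omega
      rw [if_pos ⟨ha, hb, hlen1⟩, if_pos ⟨ha, hb, hlt⟩]
      simp only [List.getD_eq_getElem?_getD]
      rw [List.getElem?_append_left hlt]
    · by_cases heq : (p - s) / st = c.length
      · have hpe : p = s + c.length * st := by
          have h5 := stride_uniq ha hb
          rw [heq] at h5
          exact h5
        have hlen1 : (p - s) / st < (c ++ [A.getD (s + c.length * st) 0]).length := by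
          simp only [List.length_append, List.length_cons, List.length_nil]
          omega
        rw [if_pos ⟨ha, hb, hlen1⟩, if_neg (by omega), heq]
        have h6 : (c ++ [A.getD (s + c.length * st) 0]).getD c.length 0
            = A.getD (s + c.length * st) 0 := by
          rw [List.getD_eq_getElem?_getD, List.getElem?_append_right (le_refl _)]
          simp
        rw [h6, ← hpe, List.getD_eq_getElem?_getD, List.getElem?_eq_getElem hpA]
        rfl
      · have hlen1 : ¬ ((p - s) / st < (c ++ [A.getD (s + c.length * st) 0]).length) := by
          simp only [List.length_append, List.length_cons, List.length_nil]
          omega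
        rw [if_neg (fun hcon => hlen1 hcon.2.2), if_neg (fun hcon => hlt hcon.2.2)]
  · rw [if_neg (fun hcon => hcond ⟨hcon.1, hcon.2.1⟩),
      if_neg (fun hcon => hcond ⟨hcon.1, hcon.2.1⟩)]

theorem jisInner_embed {A : List Int} {s st : Nat} (hst : 1 ≤ st) (hs : s < st) :
    ∀ (k : Nat) (c : List Int) (v : Int) (cmp : Int),
      k < c.length → s + (c.length - 1) * st < A.length →
      jisInner (embed A s st c) v ((s : Int) + (k : Int) * (st : Int)) (st : Int) cmp =
        (embed A s st (insLoop c k v cmp).1,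
         (s : Int) + ((insLoop c k v cmp).2.1 : Int) * (st : Int),
         (insLoop c k v cmp).2.2) := by
  intro k
  induction k using Nat.strong_induction_on with
  | _ k ih =>
    intro c v cmp hk hcap
    by_cases hk1 : 1 ≤ k
    · have hpos : s + (k - 1) * st < A.length := by
        calc s + (k - 1) * st ≤ s + (c.length - 1) * st := by
              have : (k - 1) * st ≤ (c.length - 1) * st :=
                Nat.mul_le_mul_right st (by omega)
              omega
          _ < A.length := hcap
      have hidx : ((s : Int) + (k : Int) * (st : Int)) - (st : Int)
          = ((s + (k - 1) * st : Nat) : Int) := by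
        push_cast [Nat.cast_sub hk1]
        ring
      have hread : PySem.List.pyGetD (embed A s st c)
          (((s : Int) + (k : Int) * (st : Int)) - (st : Int)) 0 = c.getD (k - 1) 0 := by
        rw [hidx, PySem.List.pyGetD_natCast, List.getD_eq_getElem?_getD,
          List.getElem?_eq_getElem (by rw [embed_length]; exact hpos), Option.getD_some]
        have := embed_getD_stride (A := A) hst (c := c) (k := k - 1) (by omega) hpos
        rw [List.getD_eq_getElem?_getD,
          List.getElem?_eq_getElem (by rw [embed_length]; exact hpos), Option.getD_some] at this
        exact this
      by_cases hcmp : v < c.getD (k - 1) 0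
      · rw [jisInner, dif_pos ⟨by exact_mod_cast hst, by
            have : st ≤ k * st := Nat.le_mul_of_pos_left st (by omega)
            push_cast
            have : (st : Int) ≤ (k : Int) * (st : Int) := by exact_mod_cast this
            omega, by rw [hread]; exact hcmp⟩]
        rw [insLoop, dif_pos ⟨hk1, hcmp⟩]
        rw [hread, hidx]
        have hset : PySem.List.pySetD (embed A s st c) ((s : Int) + (k : Int) * (st : Int))
            (c.getD (k - 1) 0) = embed A s st (c.set k (c.getD (k - 1) 0)) := by
          have hcast : (s : Int) + (k : Int) * (st : Int) = ((s + k * st : Nat) : Int) := by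
            push_cast; ring
          rw [hcast, PySem.List.pySetD_natCast,
            embed_set_stride hst hk (by
              calc s + k * st ≤ s + (c.length - 1) * st := by
                    have : k * st ≤ (c.length - 1) * st := Nat.mul_le_mul_right st (by omega)
                    omega
                _ < A.length := hcap)]
        rw [hset]
        exact ih (k - 1) (by omega) _ v (cmp + 2) (by simpa using (by omega : k - 1 < c.length))
          (by simpa using hcap)
      · rw [jisInner, dif_neg (by
            intro hcon
            exact hcmp (by rw [← hread]; exact hcon.2.2))]
        rw [insLoop, dif_neg (by intro hcon; exact hcmp hcon.2)]
    · have hk0 : k = 0 := by omega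
      subst hk0
      rw [jisInner, dif_neg (by
          intro hcon
          have h2 := hcon.2.1
          simp only [Nat.cast_zero, zero_mul, add_zero] at h2
          have : (s : Int) < (st : Int) := by exact_mod_cast hs
          omega)]
      rw [insLoop, dif_neg (by omega)]

theorem outer_run {A : List Int} {s st : Nat} (hst : 1 ≤ st) (hs : s < st)
    (hlen : s < A.length) :
    ∀ (t : Nat), s + t * st < A.length →
    (List.range t).foldl
      (fun (acc : List Int × Int) (k : Nat) =>
        (fun (acc : List Int × Int) (i : Int) =>
          let value := PySem.List.pyGetD acc.1 i 0
          let r := jisInner acc.1 value i (st : Int) acc.2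
          (PySem.List.pySetD r.1 r.2.1 value, r.2.2)) acc
          (((s : Int) + (st : Int)) + (st : Int) * (k : Int)))
      (A, (0 : Int))
    = (embed A s st (chainOf (subPre A s st (t + 1))),
       2 * invA (subPre A s st (t + 1))) := by
  intro t
  induction t with
  | zero =>
    intro _
    simp only [List.range_zero, List.foldl_nil]
    have hsub : subPre A s st 1 = [A.getD s 0] := by
      simp [subPre, List.range_one]
    have hchain : chainOf [A.getD s 0] = [A.getD s 0] := by
      simp [chainOf, chainIns, sinsPos]
    rw [hsub, hchain]
    have hemb : embed A s st [A.getD s 0] = A := by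
      apply embed_self hst
      intro k hk
      have : k = 0 := by simpa using hk
      subst this
      simp
    rw [hemb]
    simp [invA]
  | succ t ih =>
    intro hcap
    have hcap' : s + t * st < A.length := by
      have : t * st ≤ (t + 1) * st := Nat.mul_le_mul_right st (by omega)
      omega
    rw [List.range_succ, List.foldl_append, ih hcap', List.foldl_cons, List.foldl_nil]
    have hclen : (chainOf (subPre A s st (t + 1))).length = t + 1 := by
      rw [chainOf_length]
      simp [subPre]
    set pref := subPre A s st (t + 1) with hpref
    set c := chainOf pref with hcdef
    set v := A.getD (s + (t + 1) * st) 0 with hv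
    have hicast : ((s : Int) + (st : Int)) + (st : Int) * (t : Int)
        = (s : Int) + (((t + 1 : Nat)) : Int) * (st : Int) := by
      push_cast
      ring
    have hncast : (s : Int) + (((t + 1 : Nat)) : Int) * (st : Int)
        = ((s + (t + 1) * st : Nat) : Int) := by
      push_cast
      ring
    dsimp only
    rw [hicast]
    have hval : PySem.List.pyGetD (embed A s st c)
        ((s : Int) + (((t + 1 : Nat)) : Int) * (st : Int)) 0 = v := by
      rw [hncast, PySem.List.pyGetD_natCast, hv]
      exact embed_getD_stride_out hst (by omega) hcap
    rw [hval]
    have hsnoc : embed A s st c = embed A s st (c ++ [v]) := by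
      have h8 := embed_snoc_self (A := A) (s := s) (st := st) hst (c := c)
        (by rw [hclen]; exact hcap)
      rw [hclen] at h8
      rw [hv]
      exact h8.symm
    rw [hsnoc]
    have hsort : c.Pairwise (· ≤ ·) := by rw [hcdef]; exact chainOf_sorted pref
    have hinner := jisInner_embed (A := A) (s := s) (st := st) hst hs (t + 1) (c ++ [v]) v
      (2 * invA pref)
      (by simp only [List.length_append, List.length_cons, List.length_nil]; omega)
      (by
        have h9 : (c ++ [v]).length - 1 = t + 1 := by
          simp only [List.length_append, List.length_cons, List.length_nil]
          omega
        rw [h9]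
        exact hcap)
    rw [hinner]
    have hKle := sinsPos_le_length c v
    have hcontent : c ++ [v] = c.take (t + 1) ++ c.getD (t + 1) v :: c.drop (t + 1) := by
      rw [List.take_of_length_le (by omega), List.drop_eq_nil_of_le (by omega),
        List.getD_eq_default _ _ (by omega)]
    have hrun := insLoop_run hsort v (t + 1) (by omega) (by omega) (2 * invA pref)
    rw [hcontent, hrun]
    set K := sinsPos c v with hKdef
    dsimp only
    have hKc : (s : Int) + (K : Int) * (st : Int) = ((s + K * st : Nat) : Int) := by
      push_cast
      ring
    have hKlt : s + K * st < A.length := by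
      have h10 : K * st ≤ (t + 1) * st := Nat.mul_le_mul_right st (by omega)
      omega
    have hsetlen : K < (c.take K ++ c.getD K v :: c.drop K).length := by
      simp only [List.length_append, List.length_cons, List.length_take, List.length_drop]
      omega
    rw [hKc, PySem.List.pySetD_natCast, embed_set_stride hst hsetlen hKlt v]
    have hsetK : (c.take K ++ c.getD K v :: c.drop K).set K v = chainIns c v := by
      rw [List.set_append, if_neg (by simp only [List.length_take]; omega),
        (show K - (c.take K).length = 0 by simp only [List.length_take]; omega),
        List.set_cons_zero]
      unfold chainIns
      rw [← hKdef]
    rw [hsetK]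
    have hchain : chainIns c v = chainOf (pref ++ [v]) := by
      rw [hcdef]
      unfold chainOf
      rw [List.foldl_append]
      rfl
    have hsub : subPre A s st (t + 1 + 1) = pref ++ [v] := by
      rw [hpref, hv]
      simp [subPre, List.range_succ]
    have h12 : c.countP (fun a => decide (v < a)) = pref.countP (fun a => decide (v < a)) := by
      rw [hcdef]
      exact (chainOf_perm pref).countP_eq _
    have h15 : c.countP (fun a => decide ¬(decide (a ≤ v) = true))
        = c.countP (fun a => decide (v < a)) := by
      apply List.countP_congr
      intro a _
      simp [not_le]
    have h14 := List.length_eq_countP_add_countP (fun a => decide (a ≤ v)) (l := c)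
    have h13 : K + c.countP (fun a => decide (v < a)) = t + 1 := by
      have hKc2 : K = c.countP (fun a => decide (a ≤ v)) := by rw [hKdef]; rfl
      omega
    have hcount : 2 * invA pref + 2 * (((t + 1 : Nat) : Int) - (K : Int))
        = 2 * invA (pref ++ [v]) := by
      rw [invA_snoc, ← h12]
      have h16 : (c.countP (fun a => decide (v < a)) : Int) = ((t + 1 : Nat) : Int) - (K : Int) := by
        omega
      rw [h16]
      ring
    rw [hsub, hchain, hcount]

-- ===== B-side lemmas =====

theorem countP_gt_eq (c : List Int) (v : Int) :
    c.countP (fun x => decide (v < x)) = c.length - sinsPos c v := by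
  have h1 := List.length_eq_countP_add_countP (fun a => decide (a ≤ v)) (l := c)
  have h2 : c.countP (fun a => decide ¬(decide (a ≤ v) = true))
      = c.countP (fun a => decide (v < a)) := by
    apply List.countP_congr
    intro a _
    simp [not_le]
  have h3 : sinsPos c v = c.countP (fun a => decide (a ≤ v)) := rfl
  omega

theorem takeWhile_rev_count {c : List Int} (hc : c.Pairwise (· ≤ ·)) (v : Int) :
    (c.reverse.takeWhile (fun x => decide (v < x))).length
      = c.countP (fun x => decide (v < x)) := by
  rw [countP_gt_eq]
  conv_lhs => rw [(List.take_append_drop (sinsPos c v) c).symm]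
  rw [List.reverse_append, List.takeWhile_append_of_pos (by
    intro x hx
    rw [List.mem_reverse] at hx
    simpa using mem_drop_gt hc hx)]
  have htw : (c.take (sinsPos c v)).reverse.takeWhile (fun x => decide (v < x)) = [] := by
    cases hrev : (c.take (sinsPos c v)).reverse with
    | nil => rfl
    | cons a t =>
      have ha : a ∈ c.take (sinsPos c v) := by
        rw [← List.mem_reverse, hrev]
        simp
      exact List.takeWhile_cons_of_neg (by simpa using not_lt.mpr (mem_take_le hc ha))
  rw [htw, List.append_nil, List.length_reverse, List.length_drop]

theorem insert_pos_eq {c : List Int} (v : Int) :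
    PySem.List.insert c ((c.length : Int)
        - ((c.length - sinsPos c v : Nat) : Int)) v = chainIns c v := by
  have hK := sinsPos_le_length c v
  have h1 : (c.length : Int) - ((c.length - sinsPos c v : Nat) : Int)
      = ((sinsPos c v : Nat) : Int) := by
    rw [Nat.cast_sub hK]
    ring
  rw [h1, PySem.List.insert_natCast _ _ _ hK]
  rfl

def insCount : List Int → List Int → Int
  | _, [] => 0
  | c, v :: xs => (c.countP (fun a => decide (v < a)) : Int) + insCount (chainIns c v) xs

theorem fold_alt (xs : List Int) : ∀ (c : List Int) (cmp : Int), c.Pairwise (· ≤ ·) →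
    xs.foldl
      (fun (acc : List Int × Int) v =>
        (PySem.List.insert acc.1 ((acc.1.length : Int)
            - ((acc.1.reverse.takeWhile (fun x => decide (v < x))).length : Int)) v,
         acc.2 + 2 * ((acc.1.reverse.takeWhile (fun x => decide (v < x))).length : Int)))
      (c, cmp)
    = (xs.foldl chainIns c, cmp + 2 * insCount c xs) := by
  induction xs with
  | nil =>
    intro c cmp _
    simp [insCount]
  | cons v xs ih =>
    intro c cmp hc
    rw [List.foldl_cons, List.foldl_cons]
    dsimp only
    rw [takeWhile_rev_count hc, countP_gt_eq, insert_pos_eq v,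
      ih (chainIns c v) _ (chainIns_sorted hc v), insCount]
    have h1 : ((c.length - sinsPos c v : Nat) : Int)
        = (c.countP (fun a => decide (v < a)) : Int) := by
      rw [countP_gt_eq]
    rw [h1]
    congr 1
    ring

theorem insCount_eq (xs : List Int) : ∀ (c pre : List Int), c.Pairwise (· ≤ ·) → c.Perm pre →
    insCount c xs = invA (pre ++ xs) - invA pre := by
  induction xs with
  | nil =>
    intro c pre _ _
    simp [insCount]
  | cons v xs ih =>
    intro c pre hc hperm
    rw [insCount]
    have hmv : (v :: pre).Perm (pre ++ [v]) := by
      simpa using (List.perm_middle (a := v) (l₁ := pre) (l₂ := ([] : List Int))).symm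
    have h1 := ih (chainIns c v) (pre ++ [v]) (chainIns_sorted hc v)
      ((chainIns_perm c v).trans ((hperm.cons v).trans hmv))
    have h2 : (pre ++ [v]) ++ xs = pre ++ v :: xs := by
      rw [List.append_assoc]
      rfl
    rw [h1, h2, invA_snoc, hperm.countP_eq]
    ring

theorem insCount_nil_left (xs : List Int) : insCount [] xs = invA xs := by
  have h := insCount_eq xs [] [] List.Pairwise.nil (List.Perm.refl _)
  simpa [invA] using h

-- ===== slice characterization =====

theorem filterMap_getElem?_range (A : List Int) (f : Nat → Nat) (M : Nat)
    (h : ∀ k, k < M → f k < A.length) :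
    List.filterMap (fun k => A[f k]?) (List.range M)
      = (List.range M).map (fun k => A.getD (f k) 0) := by
  induction M with
  | zero => simp
  | succ M ih =>
    rw [List.range_succ, List.filterMap_append, List.map_append, ih (fun k hk => h k (by omega))]
    have hM := h M (by omega)
    simp [List.getElem?_eq_getElem hM, List.getD_eq_getElem?_getD]

theorem slice_strided {A : List Int} {s st : Nat} (hst : 1 ≤ st) (hs : s < A.length) :
    PySem.List.slice? A (some (s : Int)) none (st : Int)
      = some (subPre A s st ((A.length - s - 1) / st + 1)) := by
  have h1 : ¬ ((st : Int) < 0) := by omega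
  have h2 : ¬ ((s : Int) < 0) := by omega
  have h3 : (0 : Int) < (st : Int) := by omega
  have hsi : PySem.List.sliceIndices A.length (some (s : Int)) none (st : Int)
      = (min (s : Int) (A.length : Int), (A.length : Int), (st : Int)) := by
    simp [PySem.List.sliceIndices, h1, h2]
  rw [PySem.List.slice?, if_neg (by omega), hsi]
  have h4 : min (s : Int) (A.length : Int) = (s : Int) := min_eq_left (by omega)
  have h5 : (s : Int) < (A.length : Int) := by omega
  rw [h4]
  dsimp only
  rw [if_pos h3, if_pos h5]
  have hcount : (((A.length : Int) - (s : Int) + (st : Int) - 1) / (st : Int)).toNat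
      = (A.length - s - 1) / st + 1 := by
    have h6 : (A.length : Int) - (s : Int) + (st : Int) - 1
        = ((A.length - s - 1 + st : Nat) : Int) := by
      push_cast
      omega
    rw [h6, ← Int.natCast_ediv, Int.toNat_natCast, Nat.add_div_right _ (by omega)]
  rw [hcount]
  congr 1
  have hfun : (fun k : Nat => A[((s : Int) + (st : Int) * (k : Int)).toNat]?)
      = fun k : Nat => A[s + st * k]? := by
    funext k
    have h9 : ((s : Int) + (st : Int) * (k : Int)).toNat = s + st * k := by omega
    rw [h9]
  rw [hfun, filterMap_getElem?_range A (fun k => s + st * k) _ (fun k hk => by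
    show s + st * k < A.length
    have h7 : st * k ≤ st * ((A.length - s - 1) / st) := Nat.mul_le_mul_left st (by omega)
    have h8 := Nat.mul_div_le (A.length - s - 1) st
    omega)]
  unfold subPre
  apply List.map_congr_left
  intro k _
  rw [Nat.mul_comm]

-- when the scan is empty (len ≤ start + step), the chain A[start::step] has at most one element
theorem slice_short {A : List Int} {start step : Int} (hst : 1 ≤ step)
    (h : (A.length : Int) ≤ start + step) :
    ((PySem.List.slice? A (some start) none step).getD []).length ≤ 1 := by
  have h1 : ¬ (step < 0) := by omega
  have hsi : PySem.List.sliceIndices A.length (some start) none step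
      = ((if start < 0 then max (start + (A.length : Int)) 0
          else min start (A.length : Int)), (A.length : Int), step) := by
    simp [PySem.List.sliceIndices, h1]
  rw [PySem.List.slice?, if_neg (by omega), hsi]
  set s0 : Int := if start < 0 then max (start + (A.length : Int)) 0
      else min start (A.length : Int) with hs0
  dsimp only
  rw [if_pos (by omega : (0 : Int) < step)]
  split_ifs with hlt
  · have hb : (A.length : Int) - s0 + step - 1 ≤ 2 * step - 1 := by
      rw [hs0]
      split_ifs with hneg <;> omega
    have hdiv : ((A.length : Int) - s0 + step - 1) / step ≤ 1 := by
      have h21 : (2 * step - 1) / step = 1 := by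
        rw [show 2 * step - 1 = step - 1 + 1 * step by ring,
          Int.add_mul_ediv_right _ _ (by omega : step ≠ 0),
          Int.ediv_eq_zero_of_lt (by omega) (by omega)]
        omega
      calc ((A.length : Int) - s0 + step - 1) / step ≤ (2 * step - 1) / step :=
            Int.ediv_le_ediv (by omega) hb
        _ = 1 := h21
    calc (List.filterMap _ (List.range _)).length ≤ (List.range _).length :=
          List.length_filterMap_le _ _
      _ ≤ 1 := by
          rw [List.length_range]
          omega
  · simp

-- on an empty-scan input both sides return 0
theorem alt_short (A : List Int) (start step : Int) (hst : 1 ≤ step)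
    (h : (A.length : Int) ≤ start + step) :
    jump_insert_sort_ops_alt A start step = 0 := by
  unfold jump_insert_sort_ops_alt
  have hlen := slice_short (A := A) hst h
  cases hc : (PySem.List.slice? A (some start) none step).getD [] with
  | nil => simp [hc]
  | cons x t =>
    rw [hc] at hlen
    have ht : t = [] := by
      cases t with
      | nil => rfl
      | cons y u => simp at hlen
    subst ht
    simp [hc, List.foldl]

theorem main_empty (A : List Int) (start step : Int) (hst : 1 ≤ step)
    (h : (A.length : Int) ≤ start + step) :
    jump_insert_sort_ops A start step = jump_insert_sort_ops_alt A start step := by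
  rw [alt_short A start step hst h]
  unfold jump_insert_sort_ops
  rw [PySem.List.pyRange_of_pos (start + step) ((A.length : Nat) : Int) (by omega),
    if_neg (by omega)]
  simp

theorem range_count {A : List Int} {s st : Nat} (hst : 1 ≤ st) (hs : s < A.length) :
    (if ((s : Int) + (st : Int)) < (A.length : Int) then
       (((A.length : Int) - ((s : Int) + (st : Int)) + (st : Int) - 1) / (st : Int)).toNat
     else 0)
      = (A.length - s - 1) / st := by
  split_ifs with h
  · have h2 : (A.length : Int) - ((s : Int) + (st : Int)) + (st : Int) - 1
        = ((A.length - s - 1 : Nat) : Int) := by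
      push_cast
      omega
    rw [h2, ← Int.natCast_ediv, Int.toNat_natCast]
  · have h3 : A.length - s - 1 < st := by omega
    rw [Nat.div_eq_of_lt h3]

-- ===== main assembly =====

theorem main_nat (A : List Int) (s st : Nat) (hst : 1 ≤ st) (hs : s < st) :
    jump_insert_sort_ops A (s : Int) (st : Int)
      = jump_insert_sort_ops_alt A (s : Int) (st : Int) := by
  by_cases hne : (s : Int) + (st : Int) < (A.length : Int)
  case neg => exact main_empty A _ _ (by omega) (by omega)
  case pos =>
  have hslen : s < A.length := by omega
  have hcap : s + ((A.length - s - 1) / st) * st < A.length := by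
    have h4 := Nat.mul_div_le (A.length - s - 1) st
    have h5 : ((A.length - s - 1) / st) * st ≤ A.length - s - 1 := by
      rw [Nat.mul_comm] at h4
      exact h4
    omega
  unfold jump_insert_sort_ops jump_insert_sort_ops_alt
  rw [PySem.List.pyRange_of_pos ((s : Int) + (st : Int)) ((A.length : Nat) : Int)
    (by omega : (0 : Int) < (st : Int)), List.foldl_map, range_count hst hslen,
    outer_run hst hs (by omega) ((A.length - s - 1) / st) hcap]
  rw [slice_strided hst hslen, Option.getD_some,
    fold_alt (subPre A s st ((A.length - s - 1) / st + 1)) [] 0 List.Pairwise.nil]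
  dsimp only
  rw [insCount_nil_left]
  ring

-- ===== VERDICT (by name: the statement is the Claim_ definition above) =====
theorem jump_insert_sort_ops_spec : Claim_equal_jump_insert_sort_ops := by
  intro A start step _hdom hpre
  obtain ⟨hst, hdisj⟩ := hpre
  unfold Spec_jump_insert_sort_ops
  rcases hdisj with ⟨h0, h1⟩ | hshort
  · have hs1 : start = ((start.toNat : Nat) : Int) := (Int.toNat_of_nonneg h0).symm
    have hs2 : step = ((step.toNat : Nat) : Int) := (Int.toNat_of_nonneg (by omega)).symm
    rw [hs1, hs2]
    exact main_nat A start.toNat step.toNat (by omega) (by omega)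
  · exact main_empty A start step hst hshort
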